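-- pv_equiv track=rewrite | github.com/Charmanderander/bioinfo | bioinfo2/week4/4SpectralConvolution.py | SpectralConvolution
-- ===== SOURCE A (Python) =====
-- def SpectralConvolution(spectrum):
--     spectrum = sorted(spectrum)
--     differenceDict = {}
--     for i in range(len(spectrum)):
--         if spectrum[i] not in differenceDict:
--             differenceDict[spectrum[i]] = []
--         for j in range(i+1):
--             difference = spectrum[i] - spectrum[j]
--             if difference != 0:
--                 differenceDict[spectrum[i]].append(difference)
--
--     return differenceDict
-- ===== SOURCE B (Python) =====
-- def SpectralConvolution(spectrum):
--     s = sorted(spectrum)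
--     differenceDict = {}
--     i = 0
--     n = len(s)
--     while i < n:
--         v = s[i]
--         j = i + 1
--         while j < n and s[j] == v:
--             j += 1
--         block = [v - x for x in s[:i]]
--         differenceDict[v] = block * (j - i)
--         i = j
--     return differenceDict
-- ===== Notes on version B (the rewrite author's own statement) =====
-- stated objective: alternative
-- what changed: A runs a quadratic per-index inner loop, re-deriving every difference and filtering zeros; B sorts, then walks the list once per run of equal values, builds each distinct value's smaller-element difference block once and replicates it per occurrence.
import Mathlib
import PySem

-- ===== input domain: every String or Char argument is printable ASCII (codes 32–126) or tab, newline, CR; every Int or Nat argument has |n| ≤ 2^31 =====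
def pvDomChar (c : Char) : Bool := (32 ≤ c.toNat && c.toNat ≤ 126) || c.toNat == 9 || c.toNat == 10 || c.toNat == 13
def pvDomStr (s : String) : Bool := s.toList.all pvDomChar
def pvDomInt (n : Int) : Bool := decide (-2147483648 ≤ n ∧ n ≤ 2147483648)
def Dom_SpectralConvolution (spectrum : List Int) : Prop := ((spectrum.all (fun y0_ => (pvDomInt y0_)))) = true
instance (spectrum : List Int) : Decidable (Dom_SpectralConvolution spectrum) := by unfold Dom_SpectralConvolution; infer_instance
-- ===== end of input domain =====

-- B replaces A's quadratic per-index inner loop by a sort-then-group-runs pass that builds each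
-- distinct value's difference block once and replicates it per occurrence (objective: alternative).

-- ===== PORT A =====
-- literal transliteration of A: sort, then for each index i, ensure the key exists, then append
-- every nonzero difference spectrum[i] - spectrum[j] for j in range(i+1); return the dict (as items).
def SpectralConvolution (spectrum : List Int) : List (Int × List Int) :=
  let s := PySem.List.sorted spectrum (fun x => x) false
  ((PySem.List.pyRange 0 (s.length : Int) 1).foldl
      (fun d i =>
        let d1 := if (PySem.Dict.contains d (PySem.List.pyGetD s i 0)) = false
                  then PySem.Dict.insert d (PySem.List.pyGetD s i 0) ([] : List Int) else d
        (PySem.List.pyRange 0 (i + 1) 1).foldl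
          (fun d2 j =>
            let diff := PySem.List.pyGetD s i 0 - PySem.List.pyGetD s j 0
            if diff ≠ 0 then PySem.Dict.modify d2 (PySem.List.pyGetD s i 0) ([] : List Int) (fun l => l ++ [diff]) else d2)
          d1)
      PySem.Dict.empty).items

-- ===== PORT B =====
-- B's loop: pre = s[:i] (the already-consumed prefix), rest = s[i:]; find the run of the head value,
-- assign block * runLength, advance past the run.
def scRuns (pre rest : List Int) : List (Int × List Int) :=
  match rest with
  | [] => []
  | v :: t =>
    let run := t.takeWhile (fun x => x == v)
    let block := pre.map (fun x => v - x)
    (v, (List.replicate (run.length + 1) block).flatten) ::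
      scRuns (pre ++ List.replicate (run.length + 1) v) (t.drop run.length)
termination_by rest.length
decreasing_by simp

def SpectralConvolution_alt (spectrum : List Int) : List (Int × List Int) :=
  scRuns [] (PySem.List.sorted spectrum (fun x => x) false)

-- ===== PRECONDITION & SPEC =====
def Spec_SpectralConvolution (spectrum : List Int) (out : List (Int × List Int)) : Prop := out = SpectralConvolution_alt spectrum
instance (spectrum : List Int) (out : List (Int × List Int)) : Decidable (Spec_SpectralConvolution spectrum out) := by unfold Spec_SpectralConvolution; infer_instance

-- ===== CLAIM (what is proved, stated in full; the proofs are below) =====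
def Claim_equal_SpectralConvolution : Prop := ∀ (spectrum : List Int), Dom_SpectralConvolution spectrum → Spec_SpectralConvolution spectrum (SpectralConvolution spectrum)

-- ===== LEMMAS AND PROOFS =====

-- the common description of the result at key w, over the sorted list s
def scF (s : List Int) (w : Int) : List Int :=
  (List.replicate (s.count w) ((s.filter (fun x => x < w)).map (fun x => w - x))).flatten

-- structural reformulation of A's outer loop (one element at a time, prefix accumulated)
def aLoop : List Int → PySem.Dict Int (List Int) → List Int → PySem.Dict Int (List Int)
  | _, d, [] => d
  | pre, d, v :: t =>
      aLoop (pre ++ [v])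
        ((pre ++ [v]).foldl
          (fun d2 x => if v - x ≠ 0 then PySem.Dict.modify d2 v ([] : List Int) (fun l => l ++ [v - x]) else d2)
          (if (PySem.Dict.contains d v) = false then PySem.Dict.insert d v ([] : List Int) else d))
        t

-- A-side: bridge from index folds to structural recursion
theorem map_pyGetD_take (s : List Int) (k : Nat) (hk : k ≤ s.length) :
    (PySem.List.pyRange 0 (k : Int) 1).map (fun j => PySem.List.pyGetD s j 0) = s.take k := by
  induction k with
  | zero => simp [PySem.List.pyRange_one_eq_nil]
  | succ k ih =>
    have h1 : ((k : Int) + 1) = ((k + 1 : Nat) : Int) := by push_cast; ring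
    have h2 : PySem.List.pyRange 0 ((k : Int) + 1) 1 = PySem.List.pyRange 0 (k : Int) 1 ++ [(k : Int)] :=
      PySem.List.pyRange_one_succ_right (by positivity)
    rw [← h1, h2, List.map_append, ih (by omega)]
    have hk' : k < s.length := by omega
    rw [List.take_add_one]
    simp [PySem.List.pyGetD_natCast, List.getElem?_eq_getElem hk']

theorem outer_bridge (s : List Int) (rest : List Int) : ∀ (pre : List Int) (d : PySem.Dict Int (List Int)),
    s = pre ++ rest →
    (PySem.List.pyRange (pre.length : Int) (s.length : Int) 1).foldl
      (fun d i =>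
        let d1 := if (PySem.Dict.contains d (PySem.List.pyGetD s i 0)) = false
                  then PySem.Dict.insert d (PySem.List.pyGetD s i 0) ([] : List Int) else d
        (PySem.List.pyRange 0 (i + 1) 1).foldl
          (fun d2 j =>
            let diff := PySem.List.pyGetD s i 0 - PySem.List.pyGetD s j 0
            if diff ≠ 0 then PySem.Dict.modify d2 (PySem.List.pyGetD s i 0) ([] : List Int) (fun l => l ++ [diff]) else d2)
          d1) d
    = aLoop pre d rest := by
  induction rest with
  | nil =>
    intro pre d hs
    rw [hs]
    simp [PySem.List.pyRange_one_eq_nil, aLoop]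
  | cons v t ih =>
    intro pre d hs
    have hlt : (pre.length : Int) < (s.length : Int) := by
      rw [hs]; simp
    rw [PySem.List.pyRange_one_cons hlt, List.foldl_cons]
    have hget : PySem.List.pyGetD s (pre.length : Int) 0 = v := by
      rw [PySem.List.pyGetD_natCast, hs, List.getD_eq_getElem?_getD]
      rw [List.getElem?_append_right (le_refl _)]
      simp
    have htake : (PySem.List.pyRange 0 ((pre.length : Int) + 1) 1).map (fun j => PySem.List.pyGetD s j 0)
        = pre ++ [v] := by
      have h1 : ((pre.length : Int) + 1) = ((pre.length + 1 : Nat) : Int) := by push_cast; ring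
      rw [h1, map_pyGetD_take s (pre.length + 1) (by rw [hs]; simp)]
      rw [hs, List.take_append]
      simp
    have hlen1 : ((pre ++ [v]).length : Int) = (pre.length : Int) + 1 := by simp
    rw [show aLoop pre d (v :: t) =
        aLoop (pre ++ [v])
          ((pre ++ [v]).foldl
            (fun d2 x => if v - x ≠ 0 then PySem.Dict.modify d2 v ([] : List Int) (fun l => l ++ [v - x]) else d2)
            (if (PySem.Dict.contains d v) = false then PySem.Dict.insert d v ([] : List Int) else d))
          t from rfl]
    rw [← ih (pre ++ [v])
        ((pre ++ [v]).foldl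
          (fun d2 x => if v - x ≠ 0 then PySem.Dict.modify d2 v ([] : List Int) (fun l => l ++ [v - x]) else d2)
          (if (PySem.Dict.contains d v) = false then PySem.Dict.insert d v ([] : List Int) else d))
        (by rw [hs]; simp)]
    rw [hlen1]
    congr 1
    simp only [hget]
    rw [← htake, List.foldl_map]

-- A-side: the inner append loop, at key w / its keys
theorem innerFold_getD (v : Int) (xs : List Int) (d : PySem.Dict Int (List Int)) (w : Int) :
    (xs.foldl
      (fun d2 x => if v - x ≠ 0 then PySem.Dict.modify d2 v ([] : List Int) (fun l => l ++ [v - x]) else d2)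
      d).getD w [] =
    if w = v then d.getD w [] ++ (xs.filter (fun x => v - x ≠ 0)).map (fun x => v - x)
    else d.getD w [] := by
  induction xs generalizing d with
  | nil => simp
  | cons x xs ih =>
    simp only [List.foldl_cons]
    rw [ih]
    by_cases hx : v - x ≠ 0
    · rw [if_pos hx]
      rw [PySem.Dict.getD_modify]
      by_cases hw : w = v
      · subst hw
        simp [hx]
      · simp [hw]
    · rw [if_neg hx]
      simp only [ne_eq, not_not] at hx
      simp [hx]

theorem innerFold_keys (v : Int) (xs : List Int) (d : PySem.Dict Int (List Int))
    (hv : PySem.Dict.contains d v = true) :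
    (xs.foldl
      (fun d2 x => if v - x ≠ 0 then PySem.Dict.modify d2 v ([] : List Int) (fun l => l ++ [v - x]) else d2)
      d).keys = d.keys := by
  induction xs generalizing d with
  | nil => rfl
  | cons x xs ih =>
    simp only [List.foldl_cons]
    by_cases hx : v - x ≠ 0
    · rw [if_pos hx, ih]
      · rw [PySem.Dict.keys_modify, PySem.Dict.keys_insert_of_contains _ _ hv]
      · rw [PySem.Dict.contains_modify]
        simp
    · rw [if_neg hx, ih _ hv]

-- A-side: keys and values of the final dict
theorem aLoop_keys (rest : List Int) : ∀ (pre : List Int) (d : PySem.Dict Int (List Int)),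
    (aLoop pre d rest).keys = PySem.Set.update d.keys rest := by
  induction rest with
  | nil => intro pre d; simp [aLoop, PySem.Set.update]
  | cons v t ih =>
    intro pre d
    show (aLoop (pre ++ [v]) _ t).keys = _
    rw [ih]
    rw [PySem.Set.update_cons]
    congr 1
    rw [innerFold_keys]
    · by_cases hc : PySem.Dict.contains d v = false
      · rw [if_pos hc, PySem.Dict.keys_insert_of_not_contains _ _ hc,
          PySem.Set.add_of_not_mem]
        rw [← PySem.Dict.contains_iff_mem_keys] at *
        simp [hc]
      · rw [if_neg hc, PySem.Set.add_of_mem]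
        rw [← PySem.Dict.contains_iff_mem_keys]
        simpa using hc
    · by_cases hc : PySem.Dict.contains d v = false
      · rw [if_pos hc]; exact PySem.Dict.contains_insert_self _ _ _
      · rw [if_neg hc]; simpa using hc

theorem aLoop_getD (rest : List Int) : ∀ (pre : List Int) (d : PySem.Dict Int (List Int)) (w : Int),
    (pre ++ rest).Pairwise (· ≤ ·) →
    (aLoop pre d rest).getD w [] =
      d.getD w [] ++
        (List.replicate (rest.count w) (((pre ++ rest).filter (fun x => x < w)).map (fun x => w - x))).flatten := by
  induction rest with
  | nil => intro pre d w _; simp [aLoop]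
  | cons v t ih =>
    intro pre d w hsorted
    have hple : ∀ x ∈ pre, x ≤ v := by
      have := (List.pairwise_append.mp hsorted).2.2
      intro x hx; exact this x hx v (by simp)
    have htge : ∀ y ∈ t, v ≤ y := by
      have := ((List.pairwise_append.mp hsorted).2.1)
      exact (List.pairwise_cons.mp this).1
    have hsorted' : ((pre ++ [v]) ++ t).Pairwise (· ≤ ·) := by
      simpa using hsorted
    show (aLoop (pre ++ [v]) _ t).getD w [] = _
    rw [ih _ _ _ hsorted']
    have hfilter_eq : ((pre ++ [v]) ++ t) = pre ++ v :: t := by simp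
    rw [hfilter_eq]
    have hd1 : (if (PySem.Dict.contains d v) = false then PySem.Dict.insert d v ([] : List Int) else d).getD w [] = d.getD w [] := by
      by_cases hc : PySem.Dict.contains d v = false
      · rw [if_pos hc, PySem.Dict.getD_insert]
        split_ifs with hw
        · subst hw; rw [PySem.Dict.getD_of_not_contains _ _ hc]
        · rfl
      · rw [if_neg hc]
    rw [innerFold_getD, hd1]
    by_cases hw : w = v
    · subst hw
      rw [if_pos rfl]
      have hblock : ((pre ++ [w]).filter (fun x => w - x ≠ 0)).map (fun x => w - x)
          = ((pre ++ w :: t).filter (fun x => x < w)).map (fun x => w - x) := by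
        congr 1
        rw [List.filter_append, List.filter_append]
        have h1 : pre.filter (fun x => decide (w - x ≠ 0)) = pre.filter (fun x => decide (x < w)) := by
          apply List.filter_congr
          intro x hx
          have := hple x hx
          simp only [decide_eq_decide]
          omega
        have h2 : ([w].filter (fun x => decide (w - x ≠ 0))) = [] := by simp
        have h3 : ((w :: t).filter (fun x => decide (x < w))) = [] := by
          rw [List.filter_eq_nil_iff]
          intro y hy
          rcases List.mem_cons.mp hy with h | h
          · subst h; simp
          · have := htge y h; simp; omega
        rw [h1, h2, h3, List.append_nil]
      rw [hblock]
      have hcount : (w :: t).count w = t.count w + 1 := by simp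
      rw [hcount, List.replicate_succ]
      simp [List.append_assoc]
    · rw [if_neg hw]
      have hcount : (v :: t).count w = t.count w := by
        rw [List.count_cons]
        simp [Ne.symm hw]
      rw [hcount]

-- B-side: set/order helpers and the run characterisation
theorem discard_ofList_replicate (v : Int) (k : Nat) (t2 : List Int) (h : v ∉ t2) :
    (PySem.Set.ofList (List.replicate k v ++ t2)).discard v = PySem.Set.ofList t2 := by
  induction k with
  | zero =>
    simp only [List.replicate, List.nil_append]
    show List.filter (fun y => y != v) (PySem.Set.ofList t2) = PySem.Set.ofList t2
    rw [List.filter_eq_self]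
    intro y hy
    have : y ∈ t2 := (PySem.Set.mem_ofList _ _).mp hy
    simp
    rintro rfl; exact h this
  | succ k ih =>
    rw [List.replicate_succ, List.cons_append, PySem.Set.ofList_cons]
    show List.filter (fun y => y != v) (v :: _) = _
    rw [List.filter_cons]
    simp only [bne_self_eq_false, Bool.false_eq_true, if_false]
    show ((PySem.Set.ofList (List.replicate k v ++ t2)).discard v).discard v = _
    rw [ih]
    show List.filter (fun y => y != v) (PySem.Set.ofList t2) = _
    rw [List.filter_eq_self]
    intro y hy
    have : y ∈ t2 := (PySem.Set.mem_ofList _ _).mp hy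
    simp
    rintro rfl; exact h this

theorem gt_of_mem_dropWhile_sorted (v : Int) (t : List Int) (ht : t.Pairwise (· ≤ ·))
    (hge : ∀ y ∈ t, v ≤ y) :
    ∀ y ∈ t.dropWhile (fun x => x == v), v < y := by
  induction t with
  | nil => simp
  | cons a t ih =>
    rw [List.dropWhile_cons]
    by_cases ha : a = v
    · simp only [ha, beq_self_eq_true, if_true]
      exact ih (List.pairwise_cons.mp ht).2 (fun y hy => hge y (List.mem_cons_of_mem _ hy))
    · have hav : (a == v) = false := by simp [ha]
      rw [hav]
      simp only [Bool.false_eq_true, if_false]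
      intro y hy
      have hva : v < a := lt_of_le_of_ne (hge a (List.mem_cons_self)) (fun h => ha h.symm)
      rcases List.mem_cons.mp hy with h | h
      · omega
      · have := (List.pairwise_cons.mp ht).1 y h
        omega

theorem drop_takeWhile_length (t : List Int) (p : Int → Bool) :
    t.drop (t.takeWhile p).length = t.dropWhile p := by
  have h : t.takeWhile p ++ t.dropWhile p = t := List.takeWhile_append_dropWhile
  calc t.drop (t.takeWhile p).length
      = (t.takeWhile p ++ t.dropWhile p).drop (t.takeWhile p).length := by rw [h]
    _ = t.dropWhile p := List.drop_left

theorem scRuns_eq (pre rest : List Int) :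
    (pre ++ rest).Pairwise (· ≤ ·) →
    (∀ x ∈ pre, ∀ y ∈ rest, x < y) →
    scRuns pre rest = (PySem.Set.ofList rest).map (fun w => (w, scF (pre ++ rest) w)) := by
  induction pre, rest using scRuns.induct with
  | case1 pre => intro _ _; rw [scRuns]; rfl
  | case2 pre v t run ih =>
    intro hsorted hlt
    rw [scRuns]
    set k := (List.takeWhile (fun x => x == v) t).length with hk
    set t2 := List.drop k t with ht2
    set block := List.map (fun x => v - x) pre with hblock
    -- the run is a block of copies of v
    have hrun : List.takeWhile (fun x => x == v) t = List.replicate k v := by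
      apply List.eq_replicate_of_mem
      intro b hb
      simpa using List.mem_takeWhile_imp hb
    have hdw : t2 = t.dropWhile (fun x => x == v) := drop_takeWhile_length t _
    have htsplit : t = List.replicate k v ++ t2 := by
      rw [← hrun, hdw]
      exact List.takeWhile_append_dropWhile.symm
    -- order facts
    have hvle : ∀ y ∈ t, v ≤ y := by
      have := (List.pairwise_append.mp hsorted).2.1
      exact (List.pairwise_cons.mp this).1
    have hprelt : ∀ x ∈ pre, x < v := fun x hx => hlt x hx v (List.mem_cons_self)
    have htp : t.Pairwise (· ≤ ·) := by
      have := (List.pairwise_append.mp hsorted).2.1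
      exact (List.pairwise_cons.mp this).2
    have ht2gt : ∀ y ∈ t2, v < y := by
      rw [hdw]
      exact gt_of_mem_dropWhile_sorted v t htp hvle
    have hvnot2 : v ∉ t2 := fun h => absurd rfl (ne_of_gt (ht2gt v h))
    have hlist : pre ++ List.replicate (k + 1) v ++ t2 = pre ++ v :: t := by
      rw [List.replicate_succ]
      conv_rhs => rw [htsplit]
      simp
    -- keys
    have hkeys : PySem.Set.ofList (v :: t) = v :: PySem.Set.ofList t2 := by
      rw [PySem.Set.ofList_cons]
      congr 1
      rw [htsplit]
      exact discard_ofList_replicate v k t2 hvnot2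
    -- head value
    have hcount : (pre ++ v :: t).count v = k + 1 := by
      rw [List.count_append, List.count_cons, htsplit, List.count_append,
        List.count_replicate]
      have h1 : pre.count v = 0 := by
        rw [List.count_eq_zero]
        intro h; exact absurd rfl (ne_of_gt (hprelt v h))
      have h2 : t2.count v = 0 := by
        rw [List.count_eq_zero]
        intro h; exact absurd rfl (ne_of_gt (ht2gt v h))
      simp [h1, h2]
    have hfilt : (pre ++ v :: t).filter (fun x => x < v) = pre := by
      rw [List.filter_append]
      have h1 : pre.filter (fun x => decide (x < v)) = pre := by
        rw [List.filter_eq_self]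
        intro a ha; simpa using hprelt a ha
      have h2 : (v :: t).filter (fun x => decide (x < v)) = [] := by
        rw [List.filter_eq_nil_iff]
        intro a ha
        rcases List.mem_cons.mp ha with h | h
        · subst h; simp
        · have := hvle a h; simp; omega
      rw [h1, h2, List.append_nil]
    have hheadval : scF (pre ++ v :: t) v = (List.replicate (k + 1) block).flatten := by
      rw [scF, hcount, hfilt]
    -- tail via ih
    have hihs : (pre ++ List.replicate (k + 1) v ++ t2).Pairwise (· ≤ ·) := by
      rw [hlist]; exact hsorted
    have hihlt : ∀ x ∈ pre ++ List.replicate (k + 1) v, ∀ y ∈ t2, x < y := by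
      intro x hx y hy
      rcases List.mem_append.mp hx with h | h
      · exact hlt x h y (by
          rw [htsplit]
          exact List.mem_cons_of_mem _ (List.mem_append.mpr (Or.inr hy)))
      · have : x = v := List.eq_of_mem_replicate h
        subst this
        exact ht2gt y hy
    have htail := ih hihs hihlt
    rw [htail, hkeys]
    simp only [List.map_cons, hlist, ← hheadval]

theorem port_eq_aLoop (spectrum : List Int) :
    SpectralConvolution spectrum =
      (aLoop [] PySem.Dict.empty (PySem.List.sorted spectrum (fun x => x) false)).items := by
  rw [SpectralConvolution]
  congr 1
  have h := outer_bridge (PySem.List.sorted spectrum (fun x => x) false)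
      (PySem.List.sorted spectrum (fun x => x) false) [] PySem.Dict.empty (by simp)
  simpa using h

-- ===== VERDICT (by name: the statement is the Claim_ definition above) =====
theorem SpectralConvolution_spec : Claim_equal_SpectralConvolution := by
  unfold Claim_equal_SpectralConvolution Spec_SpectralConvolution
  intro spectrum _
  have hsort : (PySem.List.sorted spectrum (fun x => x) false).Pairwise (· ≤ ·) := by
    simpa using PySem.List.sorted_pairwise spectrum (fun x => x)
  -- A's dict as an explicit association list
  have hkeys : (aLoop [] PySem.Dict.empty (PySem.List.sorted spectrum (fun x => x) false)).keys
      = PySem.Set.ofList (PySem.List.sorted spectrum (fun x => x) false) := by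
    rw [aLoop_keys]
    simp [PySem.Dict.keys_empty, PySem.Set.update_nil_left]
  have hnodup : (aLoop [] PySem.Dict.empty (PySem.List.sorted spectrum (fun x => x) false)).keys.Nodup := by
    rw [hkeys]; exact PySem.Set.nodup_ofList _
  rw [port_eq_aLoop, PySem.Dict.items_eq_map_keys _ hnodup ([] : List Int), hkeys]
  -- B's list
  have hB : SpectralConvolution_alt spectrum
      = (PySem.Set.ofList (PySem.List.sorted spectrum (fun x => x) false)).map
          (fun w => (w, scF (PySem.List.sorted spectrum (fun x => x) false) w)) := by
    show scRuns [] (PySem.List.sorted spectrum (fun x => x) false) = _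
    rw [scRuns_eq [] _ (by simpa using hsort) (by simp)]
    simp
  rw [hB]
  apply List.map_congr_left
  intro w _
  have := aLoop_getD (PySem.List.sorted spectrum (fun x => x) false) [] PySem.Dict.empty w
      (by simpa using hsort)
  rw [this]
  simp [scF, PySem.Dict.getD_empty]
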